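-- pv_equiv track=rewrite | github.com/flipz357/smatchpp | smatchpp/data_helpers.py | __protect_brackets_inside_quotes
-- ===== SOURCE A (Python) =====
-- def __protect_brackets_inside_quotes(string):
--     newstring = []
--     in_double_quote = False
--     in_single_quote = False
--     for i, char in enumerate(string):
--         if char == "\"":
--             if not in_double_quote and string[i:].count("\"") == 1:
--                 newstring.append(char)
--                 continue
--             in_double_quote = not in_double_quote
--             newstring.append(char)
--             continue
--         if char == "\'":
--             if not in_double_quote and string[i:].count("\'") == 1:
--                 newstring.append(char)
--                 continue
--             if not in_double_quote:
--                 in_single_quote = not in_single_quote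
--             newstring.append(char)
--             continue
--         if in_double_quote == in_single_quote == False:
--             newstring.append(char)
--             continue
--         if char == "(":
--             newstring.append("<ENCLOSED_LBR>")
--             continue
--         if char == ")":
--             newstring.append("<ENCLOSED_RBR>")
--             continue
--         newstring.append(char)
--     return "".join(newstring)
-- ===== SOURCE B (Python) =====
-- def __protect_brackets_inside_quotes(string):
--     # Segment-based: jump between precomputed quote positions, emit whole slices
--     # at once, encoding brackets on the quoted slices with str.replace.
--     def enc(seg):
--         return seg.replace("(", "<ENCLOSED_LBR>").replace(")", "<ENCLOSED_RBR>")
--     quotes = [(i, c) for i, c in enumerate(string) if c in "\"'"]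
--     last_d = string.rfind("\"")
--     last_s = string.rfind("'")
--     out = []
--     pos = 0
--     dq = sq = False
--     for i, c in quotes:
--         seg = string[pos:i]
--         out.append(enc(seg) if dq or sq else seg)
--         out.append(c)
--         pos = i + 1
--         if c == "\"":
--             if dq or i != last_d:
--                 dq = not dq
--         else:
--             if not dq and i != last_s:
--                 sq = not sq
--     tail = string[pos:]
--     out.append(enc(tail) if dq or sq else tail)
--     return "".join(out)
-- ===== Notes on version B (the rewrite author's own statement) =====
-- stated objective: alternative
-- what changed: Instead of A's per-character state machine with a suffix .count scan at every quote, B precomputes the quote positions and the last occurrence of each quote char once, then jumps quote-to-quote, emitting each inter-quote slice in one piece (str.replace encodes brackets on the quoted slices); this removes A's per-quote suffix rescans, which are quadratic in the worst case (timing on the probe's inputs hovered around the 1.5x threshold, so no speed is claimed).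
import Mathlib
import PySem

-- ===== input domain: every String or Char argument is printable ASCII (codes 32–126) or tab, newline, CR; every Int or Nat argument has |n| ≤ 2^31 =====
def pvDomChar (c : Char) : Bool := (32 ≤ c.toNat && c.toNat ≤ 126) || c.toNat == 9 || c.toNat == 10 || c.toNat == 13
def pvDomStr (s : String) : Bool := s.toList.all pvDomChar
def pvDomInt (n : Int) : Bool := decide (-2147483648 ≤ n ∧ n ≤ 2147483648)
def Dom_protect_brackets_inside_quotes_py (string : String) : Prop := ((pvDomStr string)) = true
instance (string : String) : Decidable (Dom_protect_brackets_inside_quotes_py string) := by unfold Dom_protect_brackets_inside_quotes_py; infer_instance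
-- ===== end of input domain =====

-- B is a segment-based rewrite: it jumps between the precomputed quote positions and emits
-- whole inter-quote slices at once (str.replace on the quoted ones), instead of A's
-- per-character state machine with a suffix .count scan at every quote (a linear-time
-- shape where A's suffix rescans are quadratic in the worst case; measured speed on the
-- probe's inputs hovered around 1.4-1.5x, so no speed is claimed).

-- ===== PORT A =====
-- loop body of A: state (newstring, in_double_quote, in_single_quote), item (i, char);
-- string[i:].count(q) is PySem.Chars.count (PySem.List.slice cs (some i) none) [q]
def pvStepA (cs : List Char) (st : List Char × Bool × Bool) (ic : Int × Char) : List Char × Bool × Bool :=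
  match st, ic with
  | (newstring, in_dq, in_sq), (i, char) =>
    if char = '"' then
      if !in_dq && (PySem.Chars.count (PySem.List.slice cs (some i) none) ['"'] == 1) then
        (newstring ++ [char], in_dq, in_sq)
      else
        (newstring ++ [char], !in_dq, in_sq)
    else if char = '\'' then
      if !in_dq && (PySem.Chars.count (PySem.List.slice cs (some i) none) ['\''] == 1) then
        (newstring ++ [char], in_dq, in_sq)
      else
        (newstring ++ [char], in_dq, if !in_dq then !in_sq else in_sq)
    else if !in_dq && !in_sq then
      (newstring ++ [char], in_dq, in_sq)
    else if char = '(' then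
      (newstring ++ "<ENCLOSED_LBR>".toList, in_dq, in_sq)
    else if char = ')' then
      (newstring ++ "<ENCLOSED_RBR>".toList, in_dq, in_sq)
    else
      (newstring ++ [char], in_dq, in_sq)

def protect_brackets_inside_quotes_py (string : String) : String :=
  let cs := string.toList
  let r := (PySem.List.enumerate cs 0).foldl (pvStepA cs) ([], false, false)
  String.ofList r.1

-- ===== PORT B =====
-- enc(seg) = seg.replace("(", "<ENCLOSED_LBR>").replace(")", "<ENCLOSED_RBR>")
def pvEnc (seg : List Char) : List Char :=
  PySem.Chars.replace (PySem.Chars.replace seg ['('] "<ENCLOSED_LBR>".toList) [')'] "<ENCLOSED_RBR>".toList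

-- loop body of B: state (out, pos, dq, sq), item (i, c) a quote position
def pvStepB (cs : List Char) (ld ls : Int) (st : List Char × Int × Bool × Bool) (ic : Int × Char) :
    List Char × Int × Bool × Bool :=
  match st, ic with
  | (out, pos, dq, sq), (i, c) =>
    let seg := PySem.List.slice cs (some pos) (some i)
    let out' := out ++ (if dq || sq then pvEnc seg else seg) ++ [c]
    if c = '"' then
      (out', i + 1, (if dq || i ≠ ld then !dq else dq), sq)
    else
      (out', i + 1, dq, (if !dq && i ≠ ls then !sq else sq))

def protect_brackets_inside_quotes_py_alt (string : String) : String :=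
  let cs := string.toList
  let quotes := (PySem.List.enumerate cs 0).filter (fun ic => ic.2 == '"' || ic.2 == '\'')
  let ld := PySem.Chars.rfind cs ['"']
  let ls := PySem.Chars.rfind cs ['\'']
  let r := quotes.foldl (pvStepB cs ld ls) ([], 0, false, false)
  let tail := PySem.List.slice cs (some r.2.1) none
  String.ofList (r.1 ++ (if r.2.2.1 || r.2.2.2 then pvEnc tail else tail))

-- ===== PRECONDITION & SPEC =====
def Spec_protect_brackets_inside_quotes_py (string : String) (out : String) : Prop := out = protect_brackets_inside_quotes_py_alt string
instance (string : String) (out : String) : Decidable (Spec_protect_brackets_inside_quotes_py string out) := by unfold Spec_protect_brackets_inside_quotes_py; infer_instance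

-- ===== CLAIM (what is proved, stated in full; the proofs are below) =====
def Claim_equal_protect_brackets_inside_quotes_py : Prop := ∀ (string : String), Dom_protect_brackets_inside_quotes_py string → Spec_protect_brackets_inside_quotes_py string (protect_brackets_inside_quotes_py string)

-- ===== LEMMAS AND PROOFS =====

-- the per-character encoding map that pvEnc performs
def pvF (c : Char) : List Char :=
  if c = '(' then "<ENCLOSED_LBR>".toList else if c = ')' then "<ENCLOSED_RBR>".toList else [c]

-- definitional unfoldings of the two loop bodies (used by simp in pv_main)
lemma pvStepA_def (cs out : List Char) (dq sq : Bool) (i : Int) (c : Char) :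
    pvStepA cs (out, dq, sq) (i, c) =
    (if c = '"' then
      if !dq && (PySem.Chars.count (PySem.List.slice cs (some i) none) ['"'] == 1) then
        (out ++ [c], dq, sq)
      else
        (out ++ [c], !dq, sq)
    else if c = '\'' then
      if !dq && (PySem.Chars.count (PySem.List.slice cs (some i) none) ['\''] == 1) then
        (out ++ [c], dq, sq)
      else
        (out ++ [c], dq, if !dq then !sq else sq)
    else if !dq && !sq then
      (out ++ [c], dq, sq)
    else if c = '(' then
      (out ++ "<ENCLOSED_LBR>".toList, dq, sq)
    else if c = ')' then
      (out ++ "<ENCLOSED_RBR>".toList, dq, sq)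
    else
      (out ++ [c], dq, sq)) := rfl

lemma pvStepB_def (cs : List Char) (ld ls : Int) (out : List Char) (pos : Int) (dq sq : Bool)
    (i : Int) (c : Char) :
    pvStepB cs ld ls (out, pos, dq, sq) (i, c) =
    (if c = '"' then
      (out ++ (if dq || sq then pvEnc (PySem.List.slice cs (some pos) (some i))
               else PySem.List.slice cs (some pos) (some i)) ++ [c], i + 1,
       (if dq || i ≠ ld then !dq else dq), sq)
    else
      (out ++ (if dq || sq then pvEnc (PySem.List.slice cs (some pos) (some i))
               else PySem.List.slice cs (some pos) (some i)) ++ [c], i + 1, dq,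
       (if !dq && i ≠ ls then !sq else sq))) := rfl

-- str.count with a single-character needle is List.count
lemma pv_count_go (q : Char) : ∀ (fuel : Nat) (l : List Char) (acc : Nat), l.length ≤ fuel →
    PySem.Chars.count.go [q] fuel l acc = acc + l.count q := by
  intro fuel
  induction fuel with
  | zero =>
    intro l acc h
    cases l with
    | nil => simp [PySem.Chars.count.go]
    | cons c t => simp at h
  | succ n ih =>
    intro l acc h
    cases l with
    | nil => simp [PySem.Chars.count.go]
    | cons c t =>
      simp only [PySem.Chars.count.go, List.isPrefixOf]
      by_cases hq : q = c
      · subst hq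
        simp [ih t (acc + 1) (by simpa using h)]
        omega
      · simp [hq, ih t acc (by simpa using h), Ne.symm hq]

lemma pv_count_singleton (l : List Char) (q : Char) :
    PySem.Chars.count l [q] = l.count q := by
  simp [PySem.Chars.count]
  simpa using pv_count_go q l.length l 0 le_rfl

-- str.replace with a single-character needle is a flatMap
lemma pv_replace_go (q : Char) (new : List Char) : ∀ (fuel : Nat) (l acc : List Char), l.length ≤ fuel →
    PySem.Chars.replace.go [q] new fuel l acc =
      acc.reverse ++ l.flatMap (fun c => if c = q then new else [c]) := by
  intro fuel
  induction fuel with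
  | zero =>
    intro l acc h
    cases l with
    | nil => simp [PySem.Chars.replace.go]
    | cons c t => simp at h
  | succ n ih =>
    intro l acc h
    cases l with
    | nil => simp [PySem.Chars.replace.go]
    | cons c t =>
      simp only [PySem.Chars.replace.go, List.isPrefixOf]
      by_cases hq : q = c
      · subst hq
        simp [ih t (new.reverse ++ acc) (by simpa using h)]
      · simp [hq, ih t (c :: acc) (by simpa using h), Ne.symm hq]

lemma pv_replace_single (l : List Char) (q : Char) (new : List Char) :
    PySem.Chars.replace l [q] new = l.flatMap (fun c => if c = q then new else [c]) := by
  simp only [PySem.Chars.replace, List.isEmpty_cons, Bool.false_eq_true, if_false]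
  simpa using pv_replace_go q new l.length l [] le_rfl

lemma pv_enc_flatMap (l : List Char) : pvEnc l = l.flatMap pvF := by
  unfold pvEnc
  rw [pv_replace_single, pv_replace_single, List.flatMap_assoc]
  apply List.flatMap_congr
  intro c _
  by_cases h1 : c = '('
  · subst h1; decide
  · by_cases h2 : c = ')'
    · subst h2; decide
    · simp [h1, h2, pvF]

-- rfind.go returns k when k holds the last occurrence
lemma pv_rfind_go_high (s : List Char) (q : Char) (k : Nat)
    (hk : [q].isPrefixOf (s.drop k))
    (hno : ∀ m, k < m → ¬([q].isPrefixOf (s.drop m) = true)) :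
    ∀ j, k ≤ j → PySem.Chars.rfind.go s [q] j = k := by
  intro j
  induction j with
  | zero =>
    intro hj
    interval_cases k
    rw [List.drop_zero] at hk
    simp only [PySem.Chars.rfind.go]
    simp only [List.isPrefixOf_iff_prefix] at hk ⊢
    simp [hk]
  | succ n ih =>
    intro hj
    simp only [PySem.Chars.rfind.go]
    by_cases he : k = n + 1
    · subst he
      simp only [List.isPrefixOf_iff_prefix] at hk ⊢
      simp [hk]
    · have hkn : k ≤ n := by omega
      have hn1 : ¬([q].isPrefixOf (s.drop (n + 1)) = true) := hno (n + 1) (by omega)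
      simp only [List.isPrefixOf_iff_prefix] at hn1 ⊢
      simp [hn1, ih hkn]

lemma pv_rfind_go_lb (s : List Char) (q : Char) :
    ∀ (j m : Nat), m ≤ j → [q].isPrefixOf (s.drop m) → (m : Int) ≤ PySem.Chars.rfind.go s [q] j := by
  intro j
  induction j with
  | zero =>
    intro m hm hp
    interval_cases m
    rw [List.drop_zero] at hp
    simp only [PySem.Chars.rfind.go]
    simp only [List.isPrefixOf_iff_prefix] at hp ⊢
    simp [hp]
  | succ n ih =>
    intro m hm hp
    simp only [PySem.Chars.rfind.go]
    by_cases hc : [q].isPrefixOf (s.drop (n + 1)) = true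
    · simp only [List.isPrefixOf_iff_prefix] at hc ⊢
      simp [hc]
      omega
    · have hmn : m ≤ n := by
        rcases Nat.lt_or_ge m (n + 1) with h | h
        · omega
        · exfalso
          have : m = n + 1 := by omega
          exact hc (this ▸ hp)
      simp only [List.isPrefixOf_iff_prefix] at hc ⊢
      simp [hc]
      exact ih m hmn hp

lemma pv_prefix_singleton (q : Char) (l : List Char) :
    [q].isPrefixOf l = true ↔ ∃ t, l = q :: t := by
  cases l with
  | nil => simp [List.isPrefixOf]
  | cons c t =>
    simp only [List.isPrefixOf, Bool.and_true, beq_iff_eq]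
    constructor
    · rintro rfl; exact ⟨t, rfl⟩
    · rintro ⟨t', ht⟩; cases ht; rfl

-- i is the result of rfind (the last occurrence of q) iff no q occurs after i
lemma pv_last_iff (cs : List Char) (q : Char) (n : Nat) (t : List Char)
    (h : cs.drop n = q :: t) :
    ((n : Int) = PySem.Chars.rfind cs [q]) ↔ t.count q = 0 := by
  have hdrop1 : cs.drop (n + 1) = t := by
    rw [← List.tail_drop, h]
    rfl
  constructor
  · intro heq
    by_contra hc
    have hmem : q ∈ t := List.count_pos_iff.mp (Nat.pos_of_ne_zero hc)
    obtain ⟨k, hk, hkq⟩ := List.getElem_of_mem hmem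
    have hpre : [q].isPrefixOf (cs.drop (n + 1 + k)) = true := by
      rw [pv_prefix_singleton]
      have hd : cs.drop (n + 1 + k) = t.drop k := by
        rw [← hdrop1, List.drop_drop]
        try congr 1
        try omega
      rw [hd, List.drop_eq_getElem_cons hk, hkq]
      exact ⟨_, rfl⟩
    have hle : n + 1 + k ≤ cs.length := by
      by_contra hgt
      have hnil : cs.drop (n + 1 + k) = [] := List.drop_eq_nil_of_le (by omega)
      rw [hnil, pv_prefix_singleton] at hpre
      obtain ⟨t', ht'⟩ := hpre
      simp at ht'
    have := pv_rfind_go_lb cs q cs.length (n + 1 + k) hle hpre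
    unfold PySem.Chars.rfind at heq
    omega
  · intro hcnt
    have hpre : [q].isPrefixOf (cs.drop n) = true := by
      rw [pv_prefix_singleton]; exact ⟨t, h⟩
    have hno : ∀ m, n < m → ¬([q].isPrefixOf (cs.drop m) = true) := by
      intro m hm hp
      rw [pv_prefix_singleton] at hp
      obtain ⟨t', ht'⟩ := hp
      have hqmem : q ∈ t := by
        have hdm : cs.drop m = t.drop (m - n - 1) := by
          rw [← hdrop1, List.drop_drop]
          try congr 1
          try omega
        have : q ∈ t.drop (m - n - 1) := by rw [← hdm, ht']; exact List.mem_cons_self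
        exact List.mem_of_mem_drop this
      have := List.count_pos_iff.mpr hqmem
      omega
    have hlen : n ≤ cs.length := by
      by_contra hgt
      have hnil : cs.drop n = [] := List.drop_eq_nil_of_le (by omega)
      rw [hnil] at h
      simp at h
    unfold PySem.Chars.rfind
    rw [pv_rfind_go_high cs q n hpre hno cs.length hlen]

-- one non-quote character extends the pending slice
lemma pv_slice_snoc (cs : List Char) (pos : Int) (n : Nat) (c : Char) (t : List Char)
    (h0 : 0 ≤ pos) (hpi : pos.toNat ≤ n) (hl : cs.drop n = c :: t) :
    PySem.List.slice cs (some pos) (some ((n : Int) + 1)) =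
      PySem.List.slice cs (some pos) (some (n : Int)) ++ [c] := by
  have h1 : PySem.List.slice cs (some pos) (some (n : Int)) =
      (cs.drop pos.toNat).take (n - pos.toNat) := by
    rw [PySem.List.slice_toNat cs h0 (by positivity)]
    try congr 1
    try omega
  have h2 : PySem.List.slice cs (some pos) (some ((n : Int) + 1)) =
      (cs.drop pos.toNat).take (n - pos.toNat + 1) := by
    rw [PySem.List.slice_toNat cs h0 (by positivity)]
    try congr 1
    try omega
  rw [h1, h2, List.take_succ]
  congr 1
  have hget : (cs.drop pos.toNat)[n - pos.toNat]? = cs[n]? := by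
    rw [List.getElem?_drop]
    congr 1
    omega
  have hcn : cs[n]? = some c := by
    have := congrArg List.head? hl
    rwa [List.head?_drop] at this
  simp [hget, hcn]

-- exhausted slice is the tail drop
lemma pv_slice_tail (cs : List Char) (pos i : Int) (h0 : 0 ≤ pos) (hpi : pos ≤ i)
    (hl : cs.drop i.toNat = []) :
    PySem.List.slice cs (some pos) (some i) = PySem.List.slice cs (some pos) none := by
  rw [PySem.List.slice_toNat cs h0 (le_trans h0 hpi), PySem.List.slice_from cs h0]
  apply List.take_of_length_le
  rw [List.drop_eq_nil_iff] at hl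
  simp only [List.length_drop]
  omega

-- empty slice after a quote
lemma pv_slice_empty (cs : List Char) (i : Int) (h0 : 0 ≤ i) :
    PySem.List.slice cs (some (i + 1)) (some (i + 1)) = [] := by
  rw [PySem.List.slice_toNat cs (by omega) (by omega)]
  simp

-- B's tail finish applied to a state
def pvFinB (cs : List Char) (r : List Char × Int × Bool × Bool) : List Char :=
  r.1 ++ (if r.2.2.1 || r.2.2.2 then pvEnc (PySem.List.slice cs (some r.2.1) none)
          else PySem.List.slice cs (some r.2.1) none)

-- main invariant: A's per-character fold equals B's quote-jumping fold
lemma pv_main (cs : List Char) :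
    ∀ (l : List Char) (i pos : Int) (out : List Char) (dq sq : Bool),
    0 ≤ pos → pos ≤ i → cs.drop i.toNat = l →
    ((PySem.List.enumerate l i).foldl (pvStepA cs)
        (out ++ (if dq || sq then pvEnc (PySem.List.slice cs (some pos) (some i))
                 else PySem.List.slice cs (some pos) (some i)), dq, sq)).1
      = pvFinB cs (((PySem.List.enumerate l i).filter (fun ic => ic.2 == '"' || ic.2 == '\'')).foldl
          (pvStepB cs (PySem.Chars.rfind cs ['"']) (PySem.Chars.rfind cs ['\''])) (out, pos, dq, sq)) := by
  intro l
  induction l with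
  | nil =>
    intro i pos out dq sq h0 hpi hl
    rw [pv_slice_tail cs pos i h0 hpi hl]
    simp [PySem.List.enumerate_nil, pvFinB]
  | cons c t ih =>
    intro i pos out dq sq h0 hpi hl
    have hi0 : 0 ≤ i := le_trans h0 hpi
    have hnn : ((i.toNat : Int)) = i := Int.toNat_of_nonneg hi0
    have hdrop : cs.drop (i + 1).toNat = t := by
      have h1 : (i + 1).toNat = i.toNat + 1 := by omega
      rw [h1, ← List.tail_drop, hl]
      rfl
    have hsnoc := pv_slice_snoc cs pos i.toNat c t h0 (by omega) hl
    rw [hnn] at hsnoc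
    have hslice : PySem.List.slice cs (some i) none = c :: t := by
      rw [PySem.List.slice_from cs hi0, hl]
    have ihs : ∀ (out' : List Char) (dq' sq' : Bool),
        ((PySem.List.enumerate t (i + 1)).foldl (pvStepA cs) (out', dq', sq')).1 =
        pvFinB cs (((PySem.List.enumerate t (i + 1)).filter (fun ic => ic.2 == '"' || ic.2 == '\'')).foldl
          (pvStepB cs (PySem.Chars.rfind cs ['"']) (PySem.Chars.rfind cs ['\''])) (out', i + 1, dq', sq')) := by
      intro out' dq' sq'
      have h := ih (i + 1) (i + 1) out' dq' sq' (by omega) le_rfl hdrop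
      rw [pv_slice_empty cs i hi0, pv_enc_flatMap] at h
      simpa using h
    rw [PySem.List.enumerate_cons]
    simp only [List.foldl_cons, List.filter_cons]
    by_cases hc1 : c = '"'
    · -- double quote
      subst hc1
      have hcnt : PySem.Chars.count (PySem.List.slice cs (some i) none) ['"'] = t.count '"' + 1 := by
        rw [hslice, pv_count_singleton, List.count_cons_self]
      by_cases hdq : dq
      · subst hdq
        simp [pvStepA_def, pvStepB_def, hcnt]
        exact ihs _ _ _
      · simp only [Bool.not_eq_true] at hdq
        subst hdq
        by_cases ht : t.count '"' = 0
        · have hld : (i : Int) = PySem.Chars.rfind cs ['"'] := by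
            have := (pv_last_iff cs '"' i.toNat t hl).mpr ht
            rwa [hnn] at this
          have hb : (decide (i ≠ PySem.Chars.rfind cs ['"'])) = false := by simp [hld]
          simp [pvStepA_def, pvStepB_def, hcnt, ht, hb]
          exact ihs _ _ _
        · have hld : ¬((i : Int) = PySem.Chars.rfind cs ['"']) := by
            intro hh
            exact ht ((pv_last_iff cs '"' i.toNat t hl).mp (by rwa [hnn]))
          have hb : (decide (i ≠ PySem.Chars.rfind cs ['"'])) = true := by simp [hld]
          simp [pvStepA_def, pvStepB_def, hcnt, ht, hb]
          exact ihs _ _ _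
    · by_cases hc2 : c = '\''
      · -- single quote
        subst hc2
        have hcnt : PySem.Chars.count (PySem.List.slice cs (some i) none) ['\''] = t.count '\'' + 1 := by
          rw [hslice, pv_count_singleton, List.count_cons_self]
        by_cases hdq : dq
        · subst hdq
          simp [pvStepA_def, pvStepB_def, hcnt]
          exact ihs _ _ _
        · simp only [Bool.not_eq_true] at hdq
          subst hdq
          by_cases ht : t.count '\'' = 0
          · have hls : (i : Int) = PySem.Chars.rfind cs ['\''] := by
              have := (pv_last_iff cs '\'' i.toNat t hl).mpr ht
              rwa [hnn] at this
            have hb : (decide (i ≠ PySem.Chars.rfind cs ['\''])) = false := by simp [hls]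
            simp [pvStepA_def, pvStepB_def, hcnt, ht, hb]
            exact ihs _ _ _
          · have hls : ¬((i : Int) = PySem.Chars.rfind cs ['\'']) := by
              intro hh
              exact ht ((pv_last_iff cs '\'' i.toNat t hl).mp (by rwa [hnn]))
            have hb : (decide (i ≠ PySem.Chars.rfind cs ['\''])) = true := by simp [hls]
            simp [pvStepA_def, pvStepB_def, hcnt, ht, hb]
            exact ihs _ _ _
      · -- ordinary character: it joins the pending segment
        have hfil : ¬((c == '"' || c == '\'') = true) := by simp [hc1, hc2]
        rw [if_neg hfil]
        have hstep : pvStepA cs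
            (out ++ (if dq || sq then pvEnc (PySem.List.slice cs (some pos) (some i))
                     else PySem.List.slice cs (some pos) (some i)), dq, sq) (i, c)
          = (out ++ (if dq || sq then pvEnc (PySem.List.slice cs (some pos) (some (i + 1)))
                     else PySem.List.slice cs (some pos) (some (i + 1))), dq, sq) := by
          rw [hsnoc]
          simp only [pvStepA, if_neg hc1, if_neg hc2]
          by_cases hb : (dq || sq) = true
          · have hnb : ¬(!dq && !sq) = true := by
              cases dq <;> cases sq <;> simp_all
            rw [if_neg hnb, if_pos hb, if_pos hb, pv_enc_flatMap, pv_enc_flatMap,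
              List.flatMap_append]
            by_cases hp1 : c = '('
            · subst hp1; simp [pvF]
            · by_cases hp2 : c = ')'
              · subst hp2; rw [if_neg hp1]; simp [pvF]
              · rw [if_neg hp1, if_neg hp2]
                simp [pvF, hp1, hp2]
          · have hb' : (!dq && !sq) = true := by
              cases dq <;> cases sq <;> simp_all
            rw [if_pos hb', if_neg hb, if_neg hb]
            simp
        rw [hstep]
        exact ih (i + 1) pos out dq sq h0 (by omega) hdrop

-- ===== VERDICT (by name: the statement is the Claim_ definition above) =====
theorem protect_brackets_inside_quotes_py_spec : Claim_equal_protect_brackets_inside_quotes_py := by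
  intro s _
  unfold Spec_protect_brackets_inside_quotes_py
  have h := pv_main s.toList s.toList 0 0 [] false false le_rfl le_rfl (by simp)
  have h0 : PySem.List.slice s.toList (some (0 : Int)) (some (0 : Int)) = [] := by
    rw [PySem.List.slice_toNat _ le_rfl le_rfl]
    simp
  rw [h0] at h
  simp only [Bool.or_self, Bool.false_eq_true, if_false, List.append_nil] at h
  exact congrArg String.ofList h
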